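-- pv_equiv track=rewrite | github.com/diankong720-ui/Pandora | runtime/evaluation.py | summarize_execution_outcomes
-- ===== SOURCE A (Python) =====
-- from typing import Any
--
-- USABLE_EVIDENCE_STATUSES = {"success", "cached"}
--
-- def summarize_execution_outcomes(executed_queries: list[dict[str, Any]]) -> dict[str, int]:
--     """Count execution outcomes by status family for evaluator/runtime guards."""
--     summary = {
--         "usable": 0,
--         "degraded": 0,
--         "failed": 0,
--         "blocked": 0,
--         "success": 0,
--         "cached": 0,
--         "degraded_to_cache": 0,
--         "timeout": 0,
--         "failed_status": 0,
--     }
--     for query in executed_queries: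
--         status = query.get("status")
--         if status in USABLE_EVIDENCE_STATUSES:
--             summary["usable"] += 1
--         elif status == "degraded_to_cache":
--             summary["degraded"] += 1
--             summary["degraded_to_cache"] += 1
--             continue
--         else:
--             summary["failed"] += 1
--         if status == "blocked":
--             summary["blocked"] += 1
--         elif status == "success":
--             summary["success"] += 1
--         elif status == "cached":
--             summary["cached"] += 1
--         elif status == "timeout":
--             summary["timeout"] += 1
--         elif status == "failed":
--             summary["failed_status"] += 1
--     return summary
-- ===== SOURCE B (Python) =====
-- from typing import Any
-- from collections import Counter
--
-- def summarize_execution_outcomes(executed_queries: list[dict[str, Any]]) -> dict[str, int]: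
--     """Count execution outcomes by status family for evaluator/runtime guards."""
--     c = Counter(query.get("status") for query in executed_queries)
--     usable = c["success"] + c["cached"]
--     degraded = c["degraded_to_cache"]
--     return {
--         "usable": usable,
--         "degraded": degraded,
--         "failed": len(executed_queries) - usable - degraded,
--         "blocked": c["blocked"],
--         "success": c["success"],
--         "cached": c["cached"],
--         "degraded_to_cache": degraded,
--         "timeout": c["timeout"],
--         "failed_status": c["failed"],
--     }
-- ===== Notes on version B (the rewrite author's own statement) =====
-- stated objective: simpler
-- what changed: B tallies statuses once into a Counter and then derives every summary field from those counts (with failed = len - usable - degraded as a closed form), replacing A's per-item nested if/elif branching over nine mutated buckets.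
import Mathlib
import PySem

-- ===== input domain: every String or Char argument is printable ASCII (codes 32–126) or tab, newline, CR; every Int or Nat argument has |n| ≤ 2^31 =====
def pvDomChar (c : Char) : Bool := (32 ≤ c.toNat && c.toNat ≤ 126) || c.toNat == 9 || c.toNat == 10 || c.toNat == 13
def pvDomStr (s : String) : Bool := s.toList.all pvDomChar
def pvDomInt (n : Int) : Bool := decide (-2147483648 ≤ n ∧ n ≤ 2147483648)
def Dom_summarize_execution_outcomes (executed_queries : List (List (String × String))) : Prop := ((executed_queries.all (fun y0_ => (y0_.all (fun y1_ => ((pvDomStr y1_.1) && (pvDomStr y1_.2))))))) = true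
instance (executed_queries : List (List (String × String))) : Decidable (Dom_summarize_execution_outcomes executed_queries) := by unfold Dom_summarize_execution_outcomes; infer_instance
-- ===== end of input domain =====

-- B tallies statuses once into a counter, then derives each summary field from those counts
-- (failed as len - usable - degraded), replacing A's per-item nested branching over nine buckets. Same value everywhere.

-- ===== PORT A =====
-- second if/elif chain of A's loop body (the part after the usable/degraded/failed branching)
def pvSecondChain (summary : PySem.Dict String Int) (status : Option String) : PySem.Dict String Int :=
  if status = some "blocked" then summary.modify "blocked" 0 (· + 1)
  else if status = some "success" then summary.modify "success" 0 (· + 1)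
  else if status = some "cached" then summary.modify "cached" 0 (· + 1)
  else if status = some "timeout" then summary.modify "timeout" 0 (· + 1)
  else if status = some "failed" then summary.modify "failed_status" 0 (· + 1)
  else summary

-- one iteration of A's loop ('continue' = the degraded branch skips the second chain)
def pvStepA (summary : PySem.Dict String Int) (query : List (String × String)) : PySem.Dict String Int :=
  let status := (PySem.Dict.mk query).get? "status"
  if status = some "success" ∨ status = some "cached" then
    pvSecondChain (summary.modify "usable" 0 (· + 1)) status
  else if status = some "degraded_to_cache" then
    (summary.modify "degraded" 0 (· + 1)).modify "degraded_to_cache" 0 (· + 1)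
  else
    pvSecondChain (summary.modify "failed" 0 (· + 1)) status

def summarize_execution_outcomes (executed_queries : List (List (String × String))) : List (String × Int) :=
  let summary : PySem.Dict String Int := PySem.Dict.mk
    [("usable", 0), ("degraded", 0), ("failed", 0), ("blocked", 0), ("success", 0),
     ("cached", 0), ("degraded_to_cache", 0), ("timeout", 0), ("failed_status", 0)]
  (executed_queries.foldl pvStepA summary).items

-- ===== PORT B =====
def summarize_execution_outcomes_alt (executed_queries : List (List (String × String))) : List (String × Int) :=
  let c : PySem.Dict (Option String) Int :=
    PySem.Dict.counter (executed_queries.map (fun query => (PySem.Dict.mk query).get? "status"))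
  let usable := c.getD (some "success") 0 + c.getD (some "cached") 0
  let degraded := c.getD (some "degraded_to_cache") 0
  [("usable", usable),
   ("degraded", degraded),
   ("failed", (executed_queries.length : Int) - usable - degraded),
   ("blocked", c.getD (some "blocked") 0),
   ("success", c.getD (some "success") 0),
   ("cached", c.getD (some "cached") 0),
   ("degraded_to_cache", degraded),
   ("timeout", c.getD (some "timeout") 0),
   ("failed_status", c.getD (some "failed") 0)]

-- ===== PRECONDITION & SPEC =====
def Spec_summarize_execution_outcomes (executed_queries : List (List (String × String))) (out : List (String × Int)) : Prop := out = summarize_execution_outcomes_alt executed_queries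
instance (executed_queries : List (List (String × String))) (out : List (String × Int)) : Decidable (Spec_summarize_execution_outcomes executed_queries out) := by unfold Spec_summarize_execution_outcomes; infer_instance

-- ===== CLAIM (what is proved, stated in full; the proofs are below) =====
def Claim_equal_summarize_execution_outcomes : Prop := ∀ (executed_queries : List (List (String × String))), Dom_summarize_execution_outcomes executed_queries → Spec_summarize_execution_outcomes executed_queries (summarize_execution_outcomes executed_queries)

-- ===== LEMMAS AND PROOFS =====

-- the status read from one query
def pvStatus (query : List (String × String)) : Option String := (PySem.Dict.mk query).get? "status"

-- A's fold from an arbitrary nine-bucket summary, characterized by status counts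
theorem pvFoldA_items (qs : List (List (String × String)))
    (a1 a2 a3 a4 a5 a6 a7 a8 a9 : Int) :
    (qs.foldl pvStepA (PySem.Dict.mk
      [("usable", a1), ("degraded", a2), ("failed", a3), ("blocked", a4), ("success", a5),
       ("cached", a6), ("degraded_to_cache", a7), ("timeout", a8), ("failed_status", a9)])).items =
    [("usable", a1 + ((qs.map pvStatus).count (some "success") +
                      (qs.map pvStatus).count (some "cached"))),
     ("degraded", a2 + (qs.map pvStatus).count (some "degraded_to_cache")),
     ("failed", a3 + ((qs.length : Int) - ((qs.map pvStatus).count (some "success") +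
                      (qs.map pvStatus).count (some "cached")) -
                      (qs.map pvStatus).count (some "degraded_to_cache"))),
     ("blocked", a4 + (qs.map pvStatus).count (some "blocked")),
     ("success", a5 + (qs.map pvStatus).count (some "success")),
     ("cached", a6 + (qs.map pvStatus).count (some "cached")),
     ("degraded_to_cache", a7 + (qs.map pvStatus).count (some "degraded_to_cache")),
     ("timeout", a8 + (qs.map pvStatus).count (some "timeout")),
     ("failed_status", a9 + (qs.map pvStatus).count (some "failed"))] := by
  induction qs generalizing a1 a2 a3 a4 a5 a6 a7 a8 a9 with
  | nil => simp
  | cons q rest ih =>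
      simp only [List.foldl_cons, pvStepA, List.map_cons]
      rw [show (PySem.Dict.mk q).get? "status" = pvStatus q from rfl]
      generalize pvStatus q = st
      by_cases h1 : st = some "success"
      · subst h1
        simp [pvSecondChain, PySem.Dict.modify, PySem.Dict.insert, PySem.Dict.getD,
              PySem.Dict.get?, PySem.Dict.contains, ih]
        ring_nf; all_goals simp
      · by_cases h2 : st = some "cached"
        · subst h2
          simp [pvSecondChain, PySem.Dict.modify, PySem.Dict.insert, PySem.Dict.getD,
                PySem.Dict.get?, PySem.Dict.contains, ih]
          ring_nf; all_goals simp
        · by_cases h3 : st = some "degraded_to_cache"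
          · subst h3
            simp [PySem.Dict.modify, PySem.Dict.insert, PySem.Dict.getD,
                  PySem.Dict.get?, PySem.Dict.contains, ih]
            ring_nf; all_goals simp
          · by_cases h4 : st = some "blocked"
            · subst h4
              simp [pvSecondChain, PySem.Dict.modify, PySem.Dict.insert, PySem.Dict.getD,
                    PySem.Dict.get?, PySem.Dict.contains, ih]
              ring_nf; all_goals simp
            · by_cases h5 : st = some "timeout"
              · subst h5
                simp [pvSecondChain, PySem.Dict.modify, PySem.Dict.insert, PySem.Dict.getD,
                      PySem.Dict.get?, PySem.Dict.contains, ih]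
                ring_nf; all_goals simp
              · by_cases h6 : st = some "failed"
                · subst h6
                  simp [pvSecondChain, PySem.Dict.modify, PySem.Dict.insert, PySem.Dict.getD,
                        PySem.Dict.get?, PySem.Dict.contains, ih]
                  ring_nf; all_goals simp
                · simp [pvSecondChain, PySem.Dict.modify, PySem.Dict.insert, PySem.Dict.getD,
                        PySem.Dict.get?, PySem.Dict.contains, ih, h1, h2, h3, h4, h5, h6]
                  ring

-- ===== VERDICT (by name: the statement is the Claim_ definition above) =====
theorem summarize_execution_outcomes_spec : Claim_equal_summarize_execution_outcomes := by
  intro qs _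
  unfold Spec_summarize_execution_outcomes summarize_execution_outcomes summarize_execution_outcomes_alt
  rw [pvFoldA_items]
  unfold pvStatus
  simp [PySem.Dict.getD_counter]
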